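-- pv_equiv track=rewrite | github.com/jedzej/tietopythontraining-basic | students/medrek_tomasz/lesson_05_lists/the_bowling_alley.py | the_bowling_alley
-- ===== SOURCE A (Python) =====
-- def the_bowling_alley(array):
--     pins = array[0][0]
--     rolls = array[0][1]
--     output_list = ['I'] * pins
--
--     for row_no in range(1, rolls + 1):
--         for i in range(array[row_no][0] - 1, array[row_no][1]):
--             output_list[i] = '.'
--
--     return output_list
-- ===== SOURCE B (Python) =====
-- def the_bowling_alley(array):
--     pins = array[0][0]
--     rolls = array[0][1]
--     # difference array: +1 where a roll's range starts, -1 just past its end,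
--     # then one running-sum sweep emits the whole lane
--     delta = [0] * (pins + 1)
--     for k in range(1, rolls + 1):
--         start = max(array[k][0] - 1, 0)
--         end = array[k][1]
--         if start < end:
--             delta[start] += 1
--             delta[end] -= 1
--     covered = 0
--     output = []
--     for d in delta[:pins]:
--         covered += d
--         output.append('.' if covered > 0 else 'I')
--     return output
-- ===== Notes on version B (the rewrite author's own statement) =====
-- stated objective: alternative
-- what changed: A writes '.' into every cell of every roll's range one index at a time; B builds a +1/-1 difference array over range endpoints and emits the lane in one running-sum sweep.
-- intended difference: On rolls whose start pin is <= 0 (with start-1 < end), A's range(start-1, end) begins at a negative index, so Python's negative indexing wraps and marks pins at the far end of the lane; B clips the roll to the lane and marks from pin 1 instead, the intended reading since pins are numbered 1..pins. — e.g. on the_bowling_alley([[3, 1], [0, 1]]): A returns [".", "I", "."], B returns [".", "I", "I"]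
import Mathlib
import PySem

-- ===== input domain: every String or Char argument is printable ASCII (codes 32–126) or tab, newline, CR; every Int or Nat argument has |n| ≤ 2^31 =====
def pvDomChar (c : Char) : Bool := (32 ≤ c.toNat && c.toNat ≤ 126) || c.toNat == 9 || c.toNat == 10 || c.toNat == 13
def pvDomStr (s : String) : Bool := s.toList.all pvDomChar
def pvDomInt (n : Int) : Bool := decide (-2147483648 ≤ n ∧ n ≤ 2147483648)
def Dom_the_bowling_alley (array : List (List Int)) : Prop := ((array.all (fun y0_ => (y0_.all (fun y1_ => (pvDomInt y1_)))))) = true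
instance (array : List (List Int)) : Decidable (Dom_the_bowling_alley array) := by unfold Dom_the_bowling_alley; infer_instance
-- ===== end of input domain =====

-- B replaces A's per-roll cell-by-cell marking with a +1/-1 difference array and
-- one running-sum sweep (objective: alternative algorithm).

-- ===== PORT A =====
def the_bowling_alley (array : List (List Int)) : List String :=
  let pins : Int := PySem.List.pyGetD (PySem.List.pyGetD array 0 []) 0 0
  let rolls : Int := PySem.List.pyGetD (PySem.List.pyGetD array 0 []) 1 0
  let output_list : List String := PySem.List.pyRepeat ["I"] pins
  (PySem.List.pyRange 1 (rolls + 1) 1).foldl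
    (fun output_list row_no =>
      (PySem.List.pyRange (PySem.List.pyGetD (PySem.List.pyGetD array row_no []) 0 0 - 1)
          (PySem.List.pyGetD (PySem.List.pyGetD array row_no []) 1 0) 1).foldl
        (fun output_list i => PySem.List.pySetD output_list i ".") output_list)
    output_list

-- ===== PORT B =====
def the_bowling_alley_alt (array : List (List Int)) : List String :=
  let pins : Int := PySem.List.pyGetD (PySem.List.pyGetD array 0 []) 0 0
  let rolls : Int := PySem.List.pyGetD (PySem.List.pyGetD array 0 []) 1 0
  let delta : List Int := PySem.List.pyRepeat [0] (pins + 1)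
  let delta :=
    (PySem.List.pyRange 1 (rolls + 1) 1).foldl
      (fun delta k =>
        let start := max (PySem.List.pyGetD (PySem.List.pyGetD array k []) 0 0 - 1) 0
        let stop := PySem.List.pyGetD (PySem.List.pyGetD array k []) 1 0
        if start < stop then
          let d1 := PySem.List.pySetD delta start (PySem.List.pyGetD delta start 0 + 1)
          PySem.List.pySetD d1 stop (PySem.List.pyGetD d1 stop 0 - 1)
        else delta)
      delta
  ((PySem.List.slice delta none (some pins)).foldl
      (fun (st : Int × List String) d =>
        (st.1 + d, st.2 ++ [if st.1 + d > 0 then "." else "I"]))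
      ((0 : Int), ([] : List String))).2

-- ===== PRECONDITION & SPEC =====
-- shared accessors (used by Pre_/D_ only): pins/rolls header fields and roll row k
def pvRow (array : List (List Int)) (k : Nat) : List Int := array.getD (k + 1) []
def pvPins (array : List (List Int)) : Int := (array.getD 0 []).getD 0 0
def pvRolls (array : List (List Int)) : Int := (array.getD 0 []).getD 1 0
def pvS (array : List (List Int)) (k : Nat) : Int := (pvRow array k).getD 0 0 - 1
def pvE (array : List (List Int)) (k : Nat) : Int := (pvRow array k).getD 1 0

-- Pre_: exactly the inputs on which Python A returns (no IndexError): a header row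
-- of length ≥ 2 exists, rows 1..rolls exist with length ≥ 2, and every nonempty
-- roll range stays within Python's valid index range [-pins, pins).
def Pre_the_bowling_alley (array : List (List Int)) : Prop :=
  array ≠ [] ∧
  2 ≤ (array.getD 0 []).length ∧
  pvRolls array < (array.length : Int) ∧
  ∀ k ∈ List.range (pvRolls array).toNat,
    2 ≤ (pvRow array k).length ∧
    (pvS array k < pvE array k → -(pvPins array) ≤ pvS array k ∧ pvE array k ≤ pvPins array)
instance (array : List (List Int)) : Decidable (Pre_the_bowling_alley array) := by
  unfold Pre_the_bowling_alley; infer_instance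

def pvWitness_the_bowling_alley : List (List Int) := [[2, 1], [1, 2]]

-- On rolls whose start pin is ≤ 0 (so range(start-1, end) begins at a negative index),
-- A's negative Python indices wrap around and mark pins at the FAR end of the lane,
-- while B clips the roll to the lane and marks from pin 1; clipping is the intended
-- reading since pins are numbered 1..pins.
def D_the_bowling_alley (array : List (List Int)) : Prop :=
  ∃ k < (pvRolls array).toNat, (pvRow array k).getD 0 0 ≤ min 0 ((pvRow array k).getD 1 0)
instance (array : List (List Int)) : Decidable (D_the_bowling_alley array) := by
  unfold D_the_bowling_alley; infer_instance

def Spec_the_bowling_alley (array : List (List Int)) (out : List String) : Prop :=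
  ¬ D_the_bowling_alley array → out = the_bowling_alley_alt array
instance (array : List (List Int)) (out : List String) : Decidable (Spec_the_bowling_alley array out) := by
  unfold Spec_the_bowling_alley; infer_instance

def pvDiffWitness_the_bowling_alley : List (List Int) := [[3, 1], [0, 1]]
def pvDiffWitnessOut_the_bowling_alley : (List String) × (List String) :=
  ([".", "I", "."], [".", "I", "I"])

-- ===== CLAIM (what is proved, stated in full; the proofs are below) =====
def Claim_unchanged_the_bowling_alley : Prop := ∀ (array : List (List Int)), Dom_the_bowling_alley array → Pre_the_bowling_alley array → Spec_the_bowling_alley array (the_bowling_alley array)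
def Claim_changed_the_bowling_alley : Prop := Dom_the_bowling_alley (pvDiffWitness_the_bowling_alley) ∧ Pre_the_bowling_alley (pvDiffWitness_the_bowling_alley) ∧ D_the_bowling_alley (pvDiffWitness_the_bowling_alley) ∧ the_bowling_alley (pvDiffWitness_the_bowling_alley) = pvDiffWitnessOut_the_bowling_alley.1 ∧ the_bowling_alley_alt (pvDiffWitness_the_bowling_alley) = pvDiffWitnessOut_the_bowling_alley.2 ∧ pvDiffWitnessOut_the_bowling_alley.1 ≠ pvDiffWitnessOut_the_bowling_alley.2

-- ===== LEMMAS AND PROOFS =====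

-- A's marking loop, rephrased over row indices 0..n-1 (row k is array[k+1])
def markFold (array : List (List Int)) (n : Nat) (ol : List String) : List String :=
  (List.range n).foldl (fun ol k =>
    (PySem.List.pyRange (pvS array k) (pvE array k) 1).foldl
      (fun ol i => PySem.List.pySetD ol i ".") ol) ol

-- B's difference-array building loop, rephrased the same way
def deltaFold (array : List (List Int)) (n : Nat) (d : List Int) : List Int :=
  (List.range n).foldl (fun d k =>
    if max (pvS array k) 0 < pvE array k then
      PySem.List.pySetD
        (PySem.List.pySetD d (max (pvS array k) 0) (PySem.List.pyGetD d (max (pvS array k) 0) 0 + 1))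
        (pvE array k)
        (PySem.List.pyGetD
          (PySem.List.pySetD d (max (pvS array k) 0) (PySem.List.pyGetD d (max (pvS array k) 0) 0 + 1))
          (pvE array k) 0 - 1)
    else d) d

lemma markFold_succ (array : List (List Int)) (n : Nat) (ol : List String) :
    markFold array (n + 1) ol =
      (PySem.List.pyRange (pvS array n) (pvE array n) 1).foldl
        (fun ol i => PySem.List.pySetD ol i ".") (markFold array n ol) := by
  unfold markFold
  rw [List.range_succ, List.foldl_append, List.foldl_cons, List.foldl_nil]

lemma deltaFold_succ (array : List (List Int)) (n : Nat) (d : List Int) :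
    deltaFold array (n + 1) d =
      (if max (pvS array n) 0 < pvE array n then
        PySem.List.pySetD
          (PySem.List.pySetD (deltaFold array n d) (max (pvS array n) 0)
            (PySem.List.pyGetD (deltaFold array n d) (max (pvS array n) 0) 0 + 1))
          (pvE array n)
          (PySem.List.pyGetD
            (PySem.List.pySetD (deltaFold array n d) (max (pvS array n) 0)
              (PySem.List.pyGetD (deltaFold array n d) (max (pvS array n) 0) 0 + 1))
            (pvE array n) 0 - 1)
      else deltaFold array n d) := by
  unfold deltaFold
  rw [List.range_succ, List.foldl_append, List.foldl_cons, List.foldl_nil]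

lemma foldl_pySetD_length (l : List Int) (ol : List String) :
    (l.foldl (fun ol i => PySem.List.pySetD ol i ".") ol).length = ol.length := by
  induction l generalizing ol with
  | nil => rfl
  | cons x xs ih => simp [List.foldl_cons, ih, PySem.List.length_pySetD]

lemma markRange_getElem? (a b : Int) (ha : 0 ≤ a) (ol : List String) (j : Nat) :
    ((PySem.List.pyRange a b 1).foldl (fun ol i => PySem.List.pySetD ol i ".") ol)[j]? =
      if a ≤ (j : Int) ∧ (j : Int) < b ∧ j < ol.length then some "." else ol[j]? := by
  generalize hfuel : (b - a).toNat = t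
  induction t generalizing a ol with
  | zero =>
    rw [PySem.List.pyRange_one_eq_nil (by omega)]
    simp only [List.foldl_nil]
    rw [if_neg]; rintro ⟨h1, h2, h3⟩; omega
  | succ t ih =>
    have hab : a < b := by omega
    rw [PySem.List.pyRange_one_cons hab, List.foldl_cons,
      ih (a + 1) (by omega) (PySem.List.pySetD ol a ".") (by omega)]
    rw [PySem.List.pySetD_of_nonneg ol "." ha, List.length_set, List.getElem?_set]
    by_cases h1 : (j : Int) = a
    · have haj : a.toNat = j := by omega
      rw [if_neg (by omega), if_pos haj, haj]
      by_cases hjl : j < ol.length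
      · rw [if_pos hjl,
          if_pos (show a ≤ (j : Int) ∧ (j : Int) < b ∧ j < ol.length from ⟨by omega, by omega, hjl⟩)]
      · rw [if_neg hjl, if_neg (by rintro ⟨_, _, h⟩; exact hjl h),
          List.getElem?_eq_none (by omega)]
    · have haj : ¬ a.toNat = j := by omega
      rw [if_neg haj]
      have : (a + 1 ≤ (j : Int) ∧ (j : Int) < b ∧ j < ol.length) ↔
          (a ≤ (j : Int) ∧ (j : Int) < b ∧ j < ol.length) := by omega
      rw [if_congr this rfl rfl]

lemma markFold_length (array : List (List Int)) (n : Nat) (ol : List String) :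
    (markFold array n ol).length = ol.length := by
  induction n with
  | zero => rfl
  | succ n ih =>
    unfold markFold at *
    rw [List.range_succ, List.foldl_append, List.foldl_cons, List.foldl_nil,
      foldl_pySetD_length, ih]

lemma markFold_getElem? (array : List (List Int)) (n : Nat) (ol : List String) (j : Nat)
    (hw : ∀ k < n, pvS array k < pvE array k → 0 ≤ pvS array k) (hj : j < ol.length) :
    (markFold array n ol)[j]? =
      if ∃ k, k < n ∧ pvS array k ≤ (j : Int) ∧ (j : Int) < pvE array k then some "." else ol[j]? := by
  induction n with
  | zero =>
    unfold markFold
    rw [List.range_zero, List.foldl_nil, if_neg]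
    rintro ⟨k, hk, -⟩; omega
  | succ n ih =>
    have hw' : ∀ k < n, pvS array k < pvE array k → 0 ≤ pvS array k :=
      fun k hk => hw k (by omega)
    rw [markFold_succ]
    by_cases hact : pvS array n < pvE array n
    · have h0 : 0 ≤ pvS array n := hw n (by omega) hact
      rw [markRange_getElem? _ _ h0 _ j, markFold_length, ih hw']
      by_cases hcov : pvS array n ≤ (j : Int) ∧ (j : Int) < pvE array n
      · rw [if_pos ⟨hcov.1, hcov.2, hj⟩, if_pos ⟨n, by omega, hcov.1, hcov.2⟩]
      · rw [if_neg (by tauto)]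
        have hiff : (∃ k, k < n ∧ pvS array k ≤ (j : Int) ∧ (j : Int) < pvE array k) ↔
            (∃ k, k < n + 1 ∧ pvS array k ≤ (j : Int) ∧ (j : Int) < pvE array k) := by
          constructor
          · rintro ⟨k, hk, h⟩; exact ⟨k, by omega, h⟩
          · rintro ⟨k, hk, h⟩
            refine ⟨k, ?_, h⟩
            rcases Nat.lt_succ_iff_lt_or_eq.mp hk with h' | rfl
            · exact h'
            · exact absurd ⟨h.1, h.2⟩ hcov
        rw [if_congr hiff rfl rfl]
    · rw [PySem.List.pyRange_one_eq_nil (by omega), List.foldl_nil, ih hw']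
      have hiff : (∃ k, k < n ∧ pvS array k ≤ (j : Int) ∧ (j : Int) < pvE array k) ↔
          (∃ k, k < n + 1 ∧ pvS array k ≤ (j : Int) ∧ (j : Int) < pvE array k) := by
        constructor
        · rintro ⟨k, hk, h⟩; exact ⟨k, by omega, h⟩
        · rintro ⟨k, hk, h⟩
          refine ⟨k, ?_, h⟩
          rcases Nat.lt_succ_iff_lt_or_eq.mp hk with h' | rfl
          · exact h'
          · exact absurd hact (by omega)
      rw [if_congr hiff rfl rfl]

lemma sum_take_set (d : List Int) (i m : Nat) (v : Int) (h : i < d.length) :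
    ((d.set i v).take m).sum = (d.take m).sum + (if i < m then v - d.getD i 0 else 0) := by
  induction d generalizing i m with
  | nil => simp at h
  | cons x xs ih =>
    cases m with
    | zero => simp
    | succ m =>
      cases i with
      | zero => simp [List.set_cons_zero]; ring
      | succ i =>
        have h' : i < xs.length := by simpa using h
        simp only [List.set_cons_succ, List.take_succ_cons, List.sum_cons,
          List.getD_cons_succ, Nat.succ_lt_succ_iff]
        rw [ih i m h']
        ring

lemma deltaFold_length (array : List (List Int)) (n : Nat) (d : List Int) :
    (deltaFold array n d).length = d.length := by
  induction n with
  | zero => rfl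
  | succ n ih =>
    unfold deltaFold at *
    rw [List.range_succ, List.foldl_append, List.foldl_cons, List.foldl_nil]
    split
    · simp only [PySem.List.length_pySetD]
      exact ih
    · exact ih

def pvCover (array : List (List Int)) (m : Int) (k : Nat) : Bool :=
  decide (max (pvS array k) 0 < pvE array k ∧ max (pvS array k) 0 < m ∧ m ≤ pvE array k)

lemma deltaFold_take_sum (array : List (List Int)) (n : Nat) (d : List Int) (m : Nat)
    (hb : ∀ k < n, max (pvS array k) 0 < pvE array k → pvE array k < (d.length : Int)) :
    ((deltaFold array n d).take m).sum =
      (d.take m).sum + ((List.range n).countP (pvCover array (m : Int)) : Int) := by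
  induction n with
  | zero => simp [deltaFold]
  | succ n ih =>
    have hb' : ∀ k < n, max (pvS array k) 0 < pvE array k → pvE array k < (d.length : Int) :=
      fun k hk => hb k (by omega)
    rw [deltaFold_succ, List.range_succ, List.countP_append]
    by_cases hact : max (pvS array n) 0 < pvE array n
    · rw [if_pos hact]
      have hE : pvE array n < (d.length : Int) := hb n (by omega) hact
      have hs0 : (0 : Int) ≤ max (pvS array n) 0 := le_max_right _ _
      have he0 : (0 : Int) ≤ pvE array n := le_of_lt (lt_of_le_of_lt hs0 hact)
      have hlF : (deltaFold array n d).length = d.length := deltaFold_length array n d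
      have hiS : (max (pvS array n) 0).toNat < (deltaFold array n d).length := by
        rw [hlF]; omega
      rw [PySem.List.pySetD_of_nonneg _ _ hs0, PySem.List.pyGetD_of_nonneg _ _ hs0,
        PySem.List.pySetD_of_nonneg _ _ he0, PySem.List.pyGetD_of_nonneg _ _ he0]
      have hiE : (pvE array n).toNat <
          ((deltaFold array n d).set (max (pvS array n) 0).toNat
            ((deltaFold array n d).getD (max (pvS array n) 0).toNat 0 + 1)).length := by
        rw [List.length_set, hlF]; omega
      rw [sum_take_set _ _ m _ hiE, sum_take_set _ _ m _ hiS, ih hb']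
      have e1 : ((deltaFold array n d).set (max (pvS array n) 0).toNat
            ((deltaFold array n d).getD (max (pvS array n) 0).toNat 0 + 1)).getD
            (pvE array n).toNat 0 - 1 -
          ((deltaFold array n d).set (max (pvS array n) 0).toNat
            ((deltaFold array n d).getD (max (pvS array n) 0).toNat 0 + 1)).getD
            (pvE array n).toNat 0 = -1 := by ring
      have e2 : (deltaFold array n d).getD (max (pvS array n) 0).toNat 0 + 1 -
          (deltaFold array n d).getD (max (pvS array n) 0).toNat 0 = 1 := by ring
      rw [e1, e2]
      have hcnt : (List.countP (pvCover array (m : Int)) [n] : Int) =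
          (if max (pvS array n) 0 < (m : Int) then (1 : Int) else 0) +
          (if pvE array n < (m : Int) then (-1 : Int) else 0) := by
        simp only [List.countP_cons, List.countP_nil, pvCover, decide_eq_true_eq]
        by_cases h1 : max (pvS array n) 0 < (m : Int) <;>
          by_cases h2 : pvE array n < (m : Int) <;>
            simp [h1, h2, hact] <;> omega
      have c1 : ((max (pvS array n) 0).toNat < m) ↔ max (pvS array n) 0 < (m : Int) := by omega
      have c2 : ((pvE array n).toNat < m) ↔ pvE array n < (m : Int) := by omega
      rw [if_congr c2 rfl rfl, if_congr c1 rfl rfl]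
      push_cast
      rw [hcnt]
      ring
    · rw [if_neg hact, ih hb']
      have hcnt : List.countP (pvCover array (m : Int)) [n] = 0 := by
        simp [pvCover, hact]
      rw [hcnt]
      push_cast
      ring

lemma outFold (ds : List Int) (c : Int) (acc : List String) :
    (ds.foldl (fun (st : Int × List String) d =>
        (st.1 + d, st.2 ++ [if st.1 + d > 0 then "." else "I"])) (c, acc)).2 =
      acc ++ (List.range ds.length).map
        (fun j => if 0 < c + ((ds.take (j + 1)).sum) then "." else "I") := by
  induction ds generalizing c acc with
  | nil => simp
  | cons d ds ih =>
    rw [List.foldl_cons]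
    rw [show ((c, acc).1 + d, (c, acc).2 ++ [if (c, acc).1 + d > 0 then "." else "I"]) =
      (c + d, acc ++ [if c + d > 0 then "." else "I"]) from rfl]
    rw [ih (c + d) _, List.length_cons, List.range_succ_eq_map, List.map_cons, List.map_map]
    simp only [List.take_succ_cons, List.sum_cons, List.take_zero, List.sum_nil,
      add_zero, Function.comp_def, ← add_assoc, gt_iff_lt]
    simp [Nat.succ_eq_add_one]

lemma pyGetD_one_eq {α : Type} (xs : List α) (d : α) :
    PySem.List.pyGetD xs 1 d = xs.getD 1 d := by
  rw [PySem.List.pyGetD_of_nonneg _ _ (by norm_num)]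
  rfl

lemma pyGetD_succ_eq {α : Type} (xs : List α) (k : Nat) (d : α) :
    PySem.List.pyGetD xs ((k : Int) + 1) d = xs.getD (k + 1) d := by
  rw [PySem.List.pyGetD_of_nonneg _ _ (by omega),
    show ((k : Int) + 1).toNat = k + 1 from by omega]

lemma A_eq (array : List (List Int)) :
    the_bowling_alley array =
      markFold array (pvRolls array).toNat (List.replicate (pvPins array).toNat "I") := by
  unfold the_bowling_alley markFold pvS pvE pvRow pvPins pvRolls
  dsimp only
  rw [PySem.List.pyRepeat_singleton, PySem.List.pyRange_one, List.foldl_map,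
    show PySem.List.pyGetD (PySem.List.pyGetD array 0 []) 1 0 + 1 - 1 =
      PySem.List.pyGetD (PySem.List.pyGetD array 0 []) 1 0 from by ring]
  simp only [Int.add_comm 1, PySem.List.pyGetD_zero, pyGetD_one_eq, pyGetD_succ_eq]

lemma B_eq (array : List (List Int)) :
    the_bowling_alley_alt array =
      ((PySem.List.slice
          (deltaFold array (pvRolls array).toNat (List.replicate ((pvPins array) + 1).toNat 0))
          none (some (pvPins array))).foldl
        (fun (st : Int × List String) d =>
          (st.1 + d, st.2 ++ [if st.1 + d > 0 then "." else "I"]))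
        ((0 : Int), ([] : List String))).2 := by
  unfold the_bowling_alley_alt deltaFold pvS pvE pvRow pvPins pvRolls
  dsimp only
  rw [PySem.List.pyRepeat_singleton, PySem.List.pyRange_one, List.foldl_map,
    show PySem.List.pyGetD (PySem.List.pyGetD array 0 []) 1 0 + 1 - 1 =
      PySem.List.pyGetD (PySem.List.pyGetD array 0 []) 1 0 from by ring]
  simp only [Int.add_comm 1, PySem.List.pyGetD_zero, pyGetD_one_eq, pyGetD_succ_eq]

lemma main_eq (array : List (List Int))
    (hpre : Pre_the_bowling_alley array) (hnd : ¬ D_the_bowling_alley array) :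
    the_bowling_alley array = the_bowling_alley_alt array := by
  have hw : ∀ k < (pvRolls array).toNat, pvS array k < pvE array k → 0 ≤ pvS array k := by
    intro k hk hlt
    by_contra h
    refine hnd ⟨k, hk, ?_⟩
    simp only [pvS, pvE] at hlt h
    omega
  have hrows : ∀ k < (pvRolls array).toNat,
      pvS array k < pvE array k → -(pvPins array) ≤ pvS array k ∧ pvE array k ≤ pvPins array :=
    fun k hk => (hpre.2.2.2 k (List.mem_range.mpr hk)).2
  rw [A_eq, B_eq]
  by_cases hp : 0 ≤ pvPins array
  · -- pins ≥ 0
    have hbnd : ∀ k < (pvRolls array).toNat, max (pvS array k) 0 < pvE array k →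
        pvE array k < ((List.replicate ((pvPins array) + 1).toNat (0 : Int)).length : Int) := by
      intro k hk hact
      have h1 : pvS array k < pvE array k := lt_of_le_of_lt (le_max_left _ _) hact
      have h2 := (hrows k hk h1).2
      rw [List.length_replicate]
      omega
    rw [PySem.List.slice_to _ hp, outFold, List.nil_append]
    have hlF : (deltaFold array (pvRolls array).toNat
        (List.replicate ((pvPins array) + 1).toNat 0)).length = ((pvPins array) + 1).toNat := by
      rw [deltaFold_length, List.length_replicate]
    have hlds : ((deltaFold array (pvRolls array).toNat
        (List.replicate ((pvPins array) + 1).toNat 0)).take (pvPins array).toNat).length =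
        (pvPins array).toNat := by
      rw [List.length_take, hlF]; omega
    rw [hlds]
    apply List.ext_getElem?
    intro j
    by_cases hj : j < (pvPins array).toNat
    · rw [markFold_getElem? array _ _ j hw (by rw [List.length_replicate]; exact hj)]
      rw [List.getElem?_map, List.getElem?_range hj]
      simp only [Option.map_some]
      rw [List.getElem?_replicate, if_pos hj]
      rw [List.take_take, show min (j + 1) (pvPins array).toNat = j + 1 from by omega]
      rw [deltaFold_take_sum array _ _ (j + 1) hbnd]
      rw [List.take_replicate, List.sum_replicate]
      simp only [smul_zero, zero_add]
      have hiff : (∃ k, k < (pvRolls array).toNat ∧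
            pvS array k ≤ (j : Int) ∧ (j : Int) < pvE array k) ↔
          (0 : Int) < ((List.range (pvRolls array).toNat).countP
            (pvCover array ((j + 1 : Nat) : Int)) : Int) := by
        rw [Int.natCast_pos, List.countP_pos_iff]
        constructor
        · rintro ⟨k, hk, h1, h2⟩
          have h0 : 0 ≤ pvS array k := hw k hk (by omega)
          refine ⟨k, List.mem_range.mpr hk, ?_⟩
          unfold pvCover
          rw [max_eq_left h0, decide_eq_true_eq]
          push_cast
          omega
        · rintro ⟨k, hk, hc⟩
          unfold pvCover at hc
          rw [decide_eq_true_eq] at hc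
          have hm : pvS array k ≤ max (pvS array k) 0 := le_max_left _ _
          refine ⟨k, List.mem_range.mp hk, by push_cast at hc; omega, by push_cast at hc; omega⟩
      rw [show (some (if 0 < ((List.range (pvRolls array).toNat).countP
            (pvCover array ((j + 1 : Nat) : Int)) : Int) then "." else "I")) =
          (if 0 < ((List.range (pvRolls array).toNat).countP
            (pvCover array ((j + 1 : Nat) : Int)) : Int) then some "." else some "I") from
          (apply_ite some _ _ _)]
      rw [if_congr hiff rfl rfl]
    · rw [List.getElem?_eq_none (by rw [markFold_length, List.length_replicate]; omega),
        List.getElem?_eq_none (by rw [List.length_map, List.length_range]; omega)]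
  · -- pins < 0: both sides are []
    have h1 : (pvPins array).toNat = 0 := by omega
    have h2 : ((pvPins array) + 1).toNat = 0 := by omega
    rw [h1, h2]
    simp only [List.replicate_zero]
    have hM : markFold array (pvRolls array).toNat [] = [] :=
      List.eq_nil_of_length_eq_zero (by rw [markFold_length]; rfl)
    have hD : deltaFold array (pvRolls array).toNat [] = [] :=
      List.eq_nil_of_length_eq_zero (by rw [deltaFold_length]; rfl)
    rw [hM, hD]
    have hs : PySem.List.slice ([] : List Int) none (some (pvPins array)) = [] := by
      simp [PySem.List.slice]
    rw [hs, List.foldl_nil]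

-- ===== VERDICT (by name: the statement is the Claim_ definition above) =====
theorem the_bowling_alley_spec : Claim_unchanged_the_bowling_alley := by
  intro array _ hpre hnd
  exact main_eq array hpre hnd

theorem the_bowling_alley_changed : Claim_changed_the_bowling_alley := by
  unfold Claim_changed_the_bowling_alley; decide
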